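-- pv_equiv track=rewrite | github.com/vaibhvshrma/leet-us-code | 1861_rotating_the_box/solution.py | slide_stones
-- ===== SOURCE A (Python) =====
-- from typing import List
--
-- def slide_stones(row: List[str]) -> List[str]:
--     res = []
--     stones = 0
--     total_cells = 0
--     row.append("*")
--     for i in range(len(row)):
--         ch = row[i]
--         total_cells += 1
--         if ch == "#":
--             stones += 1
--         elif ch == "*":
--             res.extend(["."] * (total_cells-stones-1))
--             res.extend(["#"] * stones)
--             res.append("*")
--             stones = total_cells = 0
--     return res[:-1]
-- ===== SOURCE B (Python) =====
-- from typing import List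
--
-- def slide_stones(row: List[str]) -> List[str]:
--     row.append("*")  # same in-place mutation as the original
--     segments = []
--     cur = []
--     for ch in row:
--         if ch == "*":
--             segments.append(cur)
--             cur = []
--         else:
--             cur.append(ch)
--     rebuilt = [["."] * (len(seg) - seg.count("#")) + ["#"] * seg.count("#")
--                for seg in segments]
--     out = []
--     for i, seg in enumerate(rebuilt):
--         if i:
--             out.append("*")
--         out += seg
--     return out
-- ===== Notes on version B (the rewrite author's own statement) =====
-- stated objective: alternative
-- what changed: B splits the row (after appending '*') into segments between obstacles, rebuilds each segment as dots-then-stones from its length and '#'-count, and joins the rebuilt segments with '*', instead of A's single scan that accumulates stone/cell counters and flushes them at each obstacle.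
import Mathlib
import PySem

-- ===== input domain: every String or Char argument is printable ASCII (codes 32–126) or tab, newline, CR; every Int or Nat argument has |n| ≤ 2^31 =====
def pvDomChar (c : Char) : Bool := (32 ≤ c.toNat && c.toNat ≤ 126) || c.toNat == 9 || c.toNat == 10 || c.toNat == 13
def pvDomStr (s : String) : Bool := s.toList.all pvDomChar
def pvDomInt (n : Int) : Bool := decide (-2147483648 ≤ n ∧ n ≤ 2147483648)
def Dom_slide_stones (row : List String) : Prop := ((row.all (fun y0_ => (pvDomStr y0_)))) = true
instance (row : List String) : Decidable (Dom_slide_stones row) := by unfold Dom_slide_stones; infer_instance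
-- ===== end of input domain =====

-- B rebuilds the row by splitting it on '*' into segments and mapping each segment to
-- dots-then-stones, instead of A's counter-accumulating flush-on-obstacle scan (objective:
-- alternative, same cost).  Both Pythons append '*' to the argument in place; the proved
-- equivalence is about the return value (the mutation is identical in A and B).

-- ===== PORT A =====
-- state = (res, stones, total_cells)
def slideStep (s : List String × Int × Int) (ch : String) : List String × Int × Int :=
  let res := s.1
  let stones := s.2.1
  let total := s.2.2 + 1
  if ch = "#" then (res, stones + 1, total)
  else if ch = "*" then
    (res ++ List.replicate (total - stones - 1).toNat "." ++
       List.replicate stones.toNat "#" ++ ["*"], 0, 0)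
  else (res, stones, total)

def slide_stones (row : List String) : List String :=
  let row2 := row ++ ["*"]          -- row.append("*")
  let st := row2.foldl slideStep ([], 0, 0)
  PySem.List.slice st.1 none (some (-1))   -- res[:-1]

-- ===== PORT B =====
-- state = (segments, cur)
def splitStep (p : List (List String) × List String) (ch : String) :
    List (List String) × List String :=
  if ch = "*" then (p.1 ++ [p.2], []) else (p.1, p.2 ++ [ch])

def slide_stones_alt (row : List String) : List String :=
  let row2 := row ++ ["*"]          -- row.append("*")
  let p := row2.foldl splitStep ([], [])
  let rebuilt := p.1.map (fun seg =>
    List.replicate (seg.length - PySem.List.count seg "#") "." ++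
      List.replicate (PySem.List.count seg "#") "#")
  (PySem.List.enumerate rebuilt).foldl
    (fun out q => (if q.1 ≠ 0 then out ++ ["*"] else out) ++ q.2) []

-- ===== PRECONDITION & SPEC =====
def Spec_slide_stones (row : List String) (out : List String) : Prop := out = slide_stones_alt row
instance (row : List String) (out : List String) : Decidable (Spec_slide_stones row out) := by unfold Spec_slide_stones; infer_instance

-- ===== CLAIM (what is proved, stated in full; the proofs are below) =====
def Claim_equal_slide_stones : Prop := ∀ (row : List String), Dom_slide_stones row → Spec_slide_stones row (slide_stones row)

-- ===== LEMMAS AND PROOFS =====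

/-- Functional spec of splitting on `"*"`: completed segments and the open remainder. -/
def splitSegs : List String → List String → List (List String) × List String
  | [], cur => ([], cur)
  | ch :: t, cur =>
    if ch = "*" then
      let p := splitSegs t []
      (cur :: p.1, p.2)
    else splitSegs t (cur ++ [ch])

/-- A segment pushed right: dots then stones. -/
def render1 (seg : List String) : List String :=
  List.replicate (seg.length - seg.count "#") "." ++ List.replicate (seg.count "#") "#"

theorem bfold_char (l : List String) (segs : List (List String)) (cur : List String) :
    l.foldl splitStep (segs, cur) = (segs ++ (splitSegs l cur).1, (splitSegs l cur).2) := by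
  induction l generalizing segs cur with
  | nil => simp [splitSegs]
  | cons ch t ih =>
    by_cases h : ch = "*" <;> simp [splitStep, splitSegs, h, ih]

theorem slideStep_cur (res cur : List String) (ch : String) :
    slideStep (res, (cur.count "#" : Int), (cur.length : Int)) ch =
      if ch = "*" then
        (res ++ render1 cur ++ ["*"],
         ((([] : List String).count "#" : Int)), ((([] : List String).length : Int)))
      else (res, (((cur ++ [ch]).count "#" : Int)), (((cur ++ [ch]).length : Int))) := by
  have hc : cur.count "#" ≤ cur.length := List.count_le_length
  by_cases h2 : ch = "*"
  · subst h2
    have e1 : ((cur.length : Int) + 1 - (cur.count "#" : Int) - 1).toNat =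
        cur.length - cur.count "#" := by omega
    have e2 : ((cur.count "#" : Int)).toNat = cur.count "#" := by omega
    simp [slideStep, render1, e1, e2]
  · by_cases h1 : ch = "#"
    · subst h1
      simp [slideStep, List.count_append]
    · simp [slideStep, h1, h2, List.count_append]

theorem afold_char (l : List String) (res : List String) (cur : List String) :
    l.foldl slideStep (res, (cur.count "#" : Int), (cur.length : Int)) =
      (res ++ (splitSegs l cur).1.flatMap (fun s => render1 s ++ ["*"]),
       ((splitSegs l cur).2.count "#" : Int), ((splitSegs l cur).2.length : Int)) := by
  induction l generalizing res cur with
  | nil => simp [splitSegs]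
  | cons ch t ih =>
    rw [List.foldl_cons, slideStep_cur]
    by_cases h2 : ch = "*"
    · rw [if_pos h2, ih (res ++ render1 cur ++ ["*"]) []]
      simp [splitSegs, h2]
    · rw [if_neg h2, ih res (cur ++ [ch])]
      simp [splitSegs, h2]

theorem splitSegs_concat_star (l : List String) (cur : List String) :
    (splitSegs (l ++ ["*"]) cur).2 = [] ∧ (splitSegs (l ++ ["*"]) cur).1 ≠ [] := by
  induction l generalizing cur with
  | nil => simp [splitSegs]
  | cons ch t ih =>
    by_cases h : ch = "*" <;> simp [splitSegs, h, ih]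

theorem flatMap_star (rs : List (List String)) (h : List String) :
    (h :: rs).flatMap (fun s => s ++ ["*"]) =
      (h ++ rs.flatMap (fun r => "*" :: r)) ++ ["*"] := by
  induction rs generalizing h with
  | nil => simp
  | cons r rs' ih =>
    simp only [List.flatMap_cons] at *
    rw [ih r]
    simp

theorem enum_fold_from (t : List (List String)) (acc : List String) (s : Int) (hs : 1 ≤ s) :
    (PySem.List.enumerate t s).foldl
        (fun out q => (if q.1 ≠ 0 then out ++ ["*"] else out) ++ q.2) acc =
      acc ++ t.flatMap (fun r => "*" :: r) := by
  induction t generalizing acc s with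
  | nil => simp [PySem.List.enumerate_nil]
  | cons r rs ih =>
    rw [PySem.List.enumerate_cons, List.foldl_cons]
    have hne : s ≠ 0 := by omega
    rw [if_pos hne, ih ((acc ++ ["*"]) ++ r) (s + 1) (by omega)]
    simp

theorem join_rebuilt (h : List String) (t : List (List String)) :
    (PySem.List.enumerate (h :: t) 0).foldl
        (fun out q => (if q.1 ≠ 0 then out ++ ["*"] else out) ++ q.2) [] =
      h ++ t.flatMap (fun r => "*" :: r) := by
  rw [PySem.List.enumerate_cons, List.foldl_cons,
    if_neg (by simp : ¬((0 : Int) ≠ 0)),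
    enum_fold_from t ([] ++ h) (0 + 1) (by omega)]
  simp

theorem dropLast_append_star (x : List String) : (x ++ ["*"]).dropLast = x := by
  simp

-- ===== VERDICT (by name: the statement is the Claim_ definition above) =====
theorem slide_stones_spec : Claim_equal_slide_stones := by
  intro row _
  unfold Spec_slide_stones
  simp only [slide_stones, slide_stones_alt]
  have ha := afold_char (row ++ ["*"]) [] []
  simp only [List.count_nil, List.length_nil, Nat.cast_zero] at ha
  rw [ha, bfold_char (row ++ ["*"]) [] []]
  obtain ⟨h2, h1⟩ := splitSegs_concat_star row []
  obtain ⟨g, gs, hg⟩ := List.exists_cons_of_ne_nil h1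
  simp only [hg, List.nil_append]
  have hr : (fun (seg : List String) =>
      List.replicate (seg.length - PySem.List.count seg "#") "." ++
        List.replicate (PySem.List.count seg "#") "#") = render1 := by
    funext seg; simp [render1, PySem.List.count_eq]
  have hflat : (g :: gs).flatMap (fun s => render1 s ++ ["*"]) =
      ((g :: gs).map render1).flatMap (fun s => s ++ ["*"]) := by
    rw [List.flatMap_map]
  rw [hflat, List.map_cons, flatMap_star, PySem.List.slice_to_neg_one,
    dropLast_append_star, hr, List.map_cons, join_rebuilt, List.flatMap_map]
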